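-- pv_equiv track=rewrite | github.com/GabrielDertoni/AOC | 2022/day8a_treetop_tree_house.py | scan_height
-- ===== SOURCE A (Python) =====
-- def scan_height(iterable):
--     highest = -1
--     for height in iterable:
--         if height > highest:
--             highest = height
--             yield True
--         else:
--             yield False
-- ===== SOURCE B (Python) =====
-- def scan_height(iterable):
--     hs = list(iterable)
--     pm = [-1]
--     for h in hs:
--         pm.append(max(pm[-1], h))
--     for h, m in zip(hs, pm):
--         yield h > m
-- ===== Notes on version B (the rewrite author's own statement) =====
-- stated objective: alternative
-- what changed: Replaces A's stateful single loop with if/else yielding inside it by a two-phase prefix-scan: first build the list of running maxima of strict predecessors (seeded with -1), then zip it with the values and yield the element-wise strict comparison.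
import Mathlib
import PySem

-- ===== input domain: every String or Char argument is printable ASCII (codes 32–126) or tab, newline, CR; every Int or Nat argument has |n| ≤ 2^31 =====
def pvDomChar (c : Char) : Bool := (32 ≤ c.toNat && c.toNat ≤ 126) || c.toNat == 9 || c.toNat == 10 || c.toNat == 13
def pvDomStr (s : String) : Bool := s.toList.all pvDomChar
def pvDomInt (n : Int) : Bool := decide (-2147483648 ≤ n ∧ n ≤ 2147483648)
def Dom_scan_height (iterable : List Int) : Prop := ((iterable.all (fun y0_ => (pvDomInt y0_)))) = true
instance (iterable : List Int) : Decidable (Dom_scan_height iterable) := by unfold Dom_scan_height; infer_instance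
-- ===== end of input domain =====

-- B replaces A's stateful yield-in-loop by a prefix-maxima scan then an element-wise comparison (alternative decomposition, same cost).


-- ===== PORT A =====
-- loop with state `highest`, emitting one Bool per element
def scan_height (iterable : List Int) : List Bool :=
  (iterable.foldl
    (fun (st : Int × List Bool) height =>
      if height > st.1 then (height, st.2 ++ [true]) else (st.1, st.2 ++ [false]))
    (-1, [])).2

-- ===== PORT B =====
-- phase 1: prefix maxima pm (pm[-1] read via getLastD; pm is never empty)
-- phase 2: zip values with pm and compare
def scan_height_alt (iterable : List Int) : List Bool :=
  let pm : List Int :=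
    iterable.foldl (fun pm h => pm ++ [max (pm.getLastD (-1)) h]) [(-1 : Int)]
  (iterable.zip pm).map (fun p => decide (p.1 > p.2))

-- ===== PRECONDITION & SPEC =====
def Spec_scan_height (iterable : List Int) (out : List Bool) : Prop := out = scan_height_alt iterable
instance (iterable : List Int) (out : List Bool) : Decidable (Spec_scan_height iterable out) := by unfold Spec_scan_height; infer_instance

-- ===== CLAIM (what is proved, stated in full; the proofs are below) =====
def Claim_equal_scan_height : Prop := ∀ (iterable : List Int), Dom_scan_height iterable → Spec_scan_height iterable (scan_height iterable)

-- ===== LEMMAS AND PROOFS =====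

-- reference recursion both sides are reduced to
def pvGo (m : Int) : List Int → List Bool
  | [] => []
  | h :: t => decide (h > m) :: pvGo (max m h) t

theorem pvA_go (xs : List Int) : ∀ (m : Int) (acc : List Bool),
    (xs.foldl
      (fun (st : Int × List Bool) height =>
        if height > st.1 then (height, st.2 ++ [true]) else (st.1, st.2 ++ [false]))
      (m, acc)).2 = acc ++ pvGo m xs := by
  induction xs with
  | nil => intro m acc; simp [pvGo]
  | cons h t ih =>
    intro m acc
    by_cases hc : h > m
    · have : max m h = h := by omega
      simp [List.foldl, hc, ih, pvGo, this]
    · have : max m h = m := by omega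
      simp [List.foldl, hc, ih, pvGo, this]

-- prefix-maxima sequence
def pvPms (m : Int) : List Int → List Int
  | [] => []
  | h :: t => max m h :: pvPms (max m h) t

theorem pvB_pm (xs : List Int) : ∀ (pm0 : List Int) (m : Int), pm0.getLastD (-1) = m → pm0 ≠ [] →
    xs.foldl (fun pm h => pm ++ [max (pm.getLastD (-1)) h]) pm0 = pm0 ++ pvPms m xs := by
  induction xs with
  | nil => intro pm0 m _ _; simp [pvPms]
  | cons h t ih =>
    intro pm0 m hlast hne
    simp only [List.foldl, hlast, pvPms]
    rw [ih (pm0 ++ [max m h]) (max m h) (by simp) (by simp)]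
    simp

theorem pvB_zip (xs : List Int) : ∀ (m : Int),
    (xs.zip (m :: pvPms m xs)).map (fun p => decide (p.1 > p.2)) = pvGo m xs := by
  induction xs with
  | nil => intro m; simp [pvGo]
  | cons h t ih =>
    intro m
    simp only [pvPms, List.zip_cons_cons, List.map, pvGo]
    exact congrArg _ (ih (max m h))

-- ===== VERDICT (by name: the statement is the Claim_ definition above) =====
theorem scan_height_spec : Claim_equal_scan_height := by
  intro xs _
  unfold Spec_scan_height scan_height scan_height_alt
  rw [pvA_go, pvB_pm xs [(-1 : Int)] (-1) rfl (by simp)]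
  simp only [List.nil_append, List.singleton_append]
  rw [pvB_zip]
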